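-- pv_equiv track=rewrite | github.com/kitradrago/bsky-crosspost | src/webui.py | _update_env_var
-- ===== SOURCE A (Python) =====
-- def _update_env_var(content: str, key: str, value: str) -> str:
--     lines = content.split('\n')
--     for i, line in enumerate(lines):
--         if line.startswith(f'{key}='):
--             lines[i] = f'{key}={value}'
--             return '\n'.join(lines)
--     lines.append(f'{key}={value}')
--     return '\n'.join(lines)
-- ===== SOURCE B (Python) =====
-- def _update_env_var(content: str, key: str, value: str) -> str:
--     entry = f'{key}={value}'
--     prefix = f'{key}='
--     if content.startswith(prefix):
--         pos = 0
--     else: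
--         j = content.find('\n' + prefix)
--         pos = -1 if j < 0 else j + 1
--     if pos < 0:
--         return content + '\n' + entry
--     end = content.find('\n', pos)
--     if end < 0:
--         return content[:pos] + entry
--     return content[:pos] + entry + content[end:]
-- ===== Notes on version B (the rewrite author's own statement) =====
-- stated objective: alternative
-- what changed: B drops the split('\n')/list/join machinery entirely and works on the raw string: it locates the first line-start occurrence of 'key=' via startswith / find('\n'+key+'='), then splices 'key=value' in with two slices (or appends if absent).
-- outside the precondition, e.g. on _update_env_var('a\nb=1', 'a\nb', 'v'): A returns 'a\nb=1\na\nb=v', B returns 'a\nb=v\nb=1'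
import Mathlib
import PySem

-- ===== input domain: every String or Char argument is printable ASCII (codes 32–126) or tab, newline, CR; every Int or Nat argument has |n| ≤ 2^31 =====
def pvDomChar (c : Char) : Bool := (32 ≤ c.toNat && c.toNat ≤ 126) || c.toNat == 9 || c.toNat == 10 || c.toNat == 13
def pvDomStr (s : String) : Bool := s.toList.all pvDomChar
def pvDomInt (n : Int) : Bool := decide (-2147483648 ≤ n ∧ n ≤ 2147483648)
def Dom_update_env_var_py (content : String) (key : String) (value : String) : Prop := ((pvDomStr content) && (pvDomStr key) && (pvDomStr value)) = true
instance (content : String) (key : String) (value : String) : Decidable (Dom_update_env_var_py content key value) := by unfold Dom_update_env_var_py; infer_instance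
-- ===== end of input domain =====

-- B replaces A's split('\n') / scan-the-lines / join by a direct string-level
-- search-and-splice; return values only (neither side mutates anything observable).

-- ===== PORT A =====
-- A's for-loop over enumerate(lines) with early return, then append: structural
-- recursion over the list of lines (reaching the end = the append branch).
def pvAGo (p e : List Char) : List (List Char) → List (List Char)
  | [] => [e]
  | l :: ls => if PySem.Chars.startswith l p then e :: ls else l :: pvAGo p e ls

def update_env_var_py (content : String) (key : String) (value : String) : String :=
  let lines := PySem.Chars.splitOn content.toList ['\n']
  String.ofList (PySem.Chars.join ['\n'] (pvAGo (key.toList ++ ['=']) (key.toList ++ '=' :: value.toList) lines))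

-- ===== PORT B =====
def update_env_var_py_alt (content : String) (key : String) (value : String) : String :=
  let c := content.toList
  let entry := key.toList ++ '=' :: value.toList
  let pfx := key.toList ++ ['=']
  let pos : Int :=
    if PySem.Chars.startswith c pfx then 0
    else
      let j := PySem.Chars.find c ('\n' :: pfx)
      if j < 0 then -1 else j + 1
  if pos < 0 then String.ofList (c ++ '\n' :: entry)
  else
    let endi := PySem.Chars.findFrom c ['\n'] pos none
    if endi < 0 then String.ofList (PySem.Chars.slice c none (some pos) ++ entry)
    else String.ofList (PySem.Chars.slice c none (some pos) ++ entry ++ PySem.Chars.slice c (some endi) none)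

-- ===== PRECONDITION & SPEC =====
-- Pre_ excludes inputs whose key contains a newline AND whose content contains a
-- line-start occurrence of key+'=': there A's per-line scan can never match (it appends)
-- while B's string-level search does match, and neither behaviour is specified for a
-- multi-line env-var key — either result is an accident of the corner.
def Pre_update_env_var_py (content : String) (key : String) (value : String) : Prop :=
  '\n' ∉ key.toList ∨
    (¬ (key.toList ++ ['=']) <+: content.toList ∧ ¬ ('\n' :: key.toList ++ ['=']) <:+: content.toList)
instance (content : String) (key : String) (value : String) : Decidable (Pre_update_env_var_py content key value) := by unfold Pre_update_env_var_py; infer_instance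

def pvWitness_update_env_var_py : String × String × String := ("PATH=/bin\nHOME=/root", "HOME", "/tmp")

def Spec_update_env_var_py (content : String) (key : String) (value : String) (out : String) : Prop := out = update_env_var_py_alt content key value
instance (content : String) (key : String) (value : String) (out : String) : Decidable (Spec_update_env_var_py content key value out) := by unfold Spec_update_env_var_py; infer_instance

-- ===== CLAIM (what is proved, stated in full; the proofs are below) =====
def Claim_equal_update_env_var_py : Prop := ∀ (content : String) (key : String) (value : String), Dom_update_env_var_py content key value → Pre_update_env_var_py content key value → Spec_update_env_var_py content key value (update_env_var_py content key value)

-- ===== LEMMAS AND PROOFS =====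

-- split of a char list at every '\n' (the specification of content.split('\n'))
def linesplit : List Char → List (List Char)
  | [] => [[]]
  | a :: s => if a = '\n' then [] :: linesplit s
              else (a :: (linesplit s).headI) :: (linesplit s).tail

theorem linesplit_ne_nil (c : List Char) : linesplit c ≠ [] := by
  cases c with
  | nil => simp [linesplit]
  | cons a s => by_cases h : a = '\n' <;> simp [linesplit, h]

theorem linesplit_no_nl (c : List Char) (h : '\n' ∉ c) : linesplit c = [c] := by
  induction c with
  | nil => rfl
  | cons a s ih =>
    simp only [List.mem_cons, not_or] at h
    simp [linesplit, Ne.symm h.1, ih h.2]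

theorem linesplit_append (l r : List Char) (h : '\n' ∉ l) :
    linesplit (l ++ '\n' :: r) = l :: linesplit r := by
  induction l with
  | nil => simp [linesplit]
  | cons a s ih =>
    simp only [List.mem_cons, not_or] at h
    simp [linesplit, Ne.symm h.1, ih h.2]

theorem join_cons (x : List Char) (ls : List (List Char)) (h : ls ≠ []) :
    PySem.Chars.join ['\n'] (x :: ls) = x ++ '\n' :: PySem.Chars.join ['\n'] ls := by
  cases ls with
  | nil => exact absurd rfl h
  | cons y ys => rw [PySem.Chars.join_cons_cons]; simp

theorem join_linesplit (c : List Char) : PySem.Chars.join ['\n'] (linesplit c) = c := by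
  induction c with
  | nil => simp [linesplit, PySem.Chars.join_singleton]
  | cons a s ih =>
    by_cases h : a = '\n'
    · subst h
      rw [linesplit, if_pos rfl, join_cons _ _ (linesplit_ne_nil s), ih]
      simp
    · rw [linesplit, if_neg h]
      rcases hs : linesplit s with _ | ⟨t, ts⟩
      · exact absurd hs (linesplit_ne_nil s)
      · cases ts with
        | nil =>
          simp only [List.headI, List.tail]
          rw [PySem.Chars.join_singleton]
          rw [hs, PySem.Chars.join_singleton] at ih
          simp [ih]
        | cons u us =>
          simp only [List.headI, List.tail]
          rw [join_cons _ _ (by simp)]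
          rw [hs, join_cons _ _ (by simp)] at ih
          simp [← ih]

theorem go_spec (fuel : ℕ) (l cur : List Char) (acc : List (List Char)) (h : l.length < fuel) :
    PySem.Chars.splitOn.go ['\n'] fuel l cur acc =
      acc.reverse ++ (linesplit l).modifyHead (cur.reverse ++ ·) := by
  induction fuel generalizing l cur acc with
  | zero => omega
  | succ f ih =>
    cases l with
    | nil => simp [PySem.Chars.splitOn.go, linesplit]
    | cons a rest =>
      rw [PySem.Chars.splitOn.go]
      by_cases ha : a = '\n'
      · subst ha
        have hpre : List.isPrefixOf ['\n'] ('\n' :: rest) = true := by simp [List.isPrefixOf]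
        rw [if_pos hpre]
        rw [ih _ _ _ (by simp at h ⊢; omega)]
        simp [linesplit]
        rcases linesplit rest with _ | ⟨t, ts⟩ <;> simp
      · have hpre : List.isPrefixOf ['\n'] (a :: rest) = false := by
          simp [List.isPrefixOf]; intro hh; exact absurd hh.symm ha
        rw [if_neg (by simp [hpre])]
        rw [ih _ _ _ (by simp at h ⊢; omega)]
        rw [linesplit, if_neg ha]
        rcases hs : linesplit rest with _ | ⟨t, ts⟩
        · exact absurd hs (linesplit_ne_nil rest)
        · simp

theorem splitOn_eq_linesplit (c : List Char) :
    PySem.Chars.splitOn c ['\n'] = linesplit c := by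
  rw [PySem.Chars.splitOn, go_spec _ _ _ _ (by omega)]
  rcases hs : linesplit c with _ | ⟨t, ts⟩
  · exact absurd hs (linesplit_ne_nil c)
  · simp

theorem pvAGo_ne_nil (p e : List Char) (ls : List (List Char)) : pvAGo p e ls ≠ [] := by
  cases ls with
  | nil => simp [pvAGo]
  | cons l ls => by_cases h : PySem.Chars.startswith l p <;> simp [pvAGo, h]

theorem infix_of_prefix_drop {s sub : List Char} (m : ℕ) (h1 : sub <+: s.drop m) : sub <:+: s := by
  have h := PySem.Chars.exists_prefix_drop_iff_isIn (s := s) (sub := sub)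
  rw [PySem.Chars.isIn_iff_infix] at h
  exact h.mp ⟨m, h1⟩

theorem find_eq_coe (s sub : List Char) (m : ℕ) (h1 : sub <+: s.drop m)
    (h2 : ∀ i < m, ¬ sub <+: s.drop i) : PySem.Chars.find s sub = (m : ℤ) := by
  have hnn : 0 ≤ PySem.Chars.find s sub := (PySem.Chars.find_nonneg_iff s sub).mpr (infix_of_prefix_drop m h1)
  obtain ⟨hpre, hmin⟩ := PySem.Chars.find_spec hnn
  have : (PySem.Chars.find s sub).toNat = m := by
    rcases lt_trichotomy (PySem.Chars.find s sub).toNat m with h | h | h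
    · exact absurd hpre (h2 _ h)
    · exact h
    · exact absurd h1 (hmin m h)
  omega

theorem find_eq_neg_one_of (s sub : List Char) (h : ∀ i, ¬ sub <+: s.drop i) :
    PySem.Chars.find s sub = -1 := by
  rw [PySem.Chars.find_eq_neg_one_iff]
  intro hinf
  have him := PySem.Chars.exists_prefix_drop_iff_isIn (s := s) (sub := sub)
  rw [PySem.Chars.isIn_iff_infix] at him
  obtain ⟨j, hj⟩ := him.mpr hinf
  exact h j hj

theorem not_prefix_drop_of_find_neg (s sub : List Char) (h : PySem.Chars.find s sub = -1) :
    ∀ i, ¬ sub <+: s.drop i := by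
  intro i hi
  rw [PySem.Chars.find_eq_neg_one_iff] at h
  exact h (infix_of_prefix_drop i hi)

theorem no_nl_prefix (l r q : List Char) (hl : '\n' ∉ l) (i : ℕ) (hi : i < l.length) :
    ¬ ('\n' :: q) <+: (l ++ '\n' :: r).drop i := by
  intro hpre
  have hd : ((l ++ '\n' :: r).drop i).head? = some '\n' := by
    rcases hpre with ⟨t, ht⟩
    rw [← ht]; rfl
  rw [List.drop_append_of_le_length (by omega)] at hd
  rw [List.head?_append_of_ne_nil] at hd
  · exact hl (List.mem_of_mem_drop (List.mem_of_mem_head? hd))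
  · intro hnil
    have := congrArg List.length hnil
    simp at this; omega

theorem prefix_first_line (p l r : List Char) (hp : '\n' ∉ p) :
    p <+: (l ++ '\n' :: r) ↔ p <+: l := by
  constructor
  · intro h
    by_cases hlen : p.length ≤ l.length
    · have h1 : p = (l ++ '\n' :: r).take p.length := List.prefix_iff_eq_take.mp h
      rw [List.take_append_of_le_length hlen] at h1
      exact h1 ▸ List.take_prefix _ _
    · exfalso
      refine hp ?_
      have h1 : p = (l ++ '\n' :: r).take p.length := List.prefix_iff_eq_take.mp h
      rw [h1, List.take_append, List.take_of_length_le (by omega)]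
      refine List.mem_append.mpr (Or.inr ?_)
      rcases hh : p.length - l.length with _ | n
      · omega
      · simp
  · intro h
    exact h.trans (l.prefix_append _)

theorem drop_shift (l r : List Char) (a : Char) (x : ℕ) :
    (l ++ a :: r).drop (l.length + 1 + x) = r.drop x := by
  rw [List.drop_append]
  rw [List.drop_of_length_le (by omega)]
  simp only [List.nil_append]
  have : l.length + 1 + x - l.length = x + 1 := by omega
  rw [this]
  rfl

theorem take_shift (l r : List Char) (a : Char) (x : ℕ) :
    (l ++ a :: r).take (l.length + 1 + x) = l ++ a :: r.take x := by
  rw [List.take_append]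
  rw [List.take_of_length_le (by omega)]
  have : l.length + 1 + x - l.length = x + 1 := by omega
  rw [this]
  rfl

-- B's body on char lists (the list-level core of port B; `alt_eq_bCore` below ties them)
def bCore (p e c : List Char) : List Char :=
  let pos : Int :=
    if PySem.Chars.startswith c p then 0
    else
      let j := PySem.Chars.find c ('\n' :: p)
      if j < 0 then -1 else j + 1
  if pos < 0 then c ++ '\n' :: e
  else
    let endi := PySem.Chars.findFrom c ['\n'] pos none
    if endi < 0 then PySem.Chars.slice c none (some pos) ++ e
    else PySem.Chars.slice c none (some pos) ++ e ++ PySem.Chars.slice c (some endi) none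

theorem alt_eq_bCore (content key value : String) :
    update_env_var_py_alt content key value =
      String.ofList (bCore (key.toList ++ ['=']) (key.toList ++ '=' :: value.toList) content.toList) := by
  unfold update_env_var_py_alt bCore
  dsimp only
  split_ifs <;> rfl

theorem bCore_nonl (p e c : List Char) (hc : '\n' ∉ c) :
    bCore p e c = if p <+: c then e else c ++ '\n' :: e := by
  have hno : ∀ (q : List Char) (i : ℕ), ¬ ('\n' :: q) <+: c.drop i := by
    intro q i hpre
    have hd : (c.drop i).head? = some '\n' := by
      rcases hpre with ⟨t, ht⟩; rw [← ht]; rfl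
    exact hc (List.mem_of_mem_drop (List.mem_of_mem_head? hd))
  by_cases hpc : p <+: c
  · have hsw : PySem.Chars.startswith c p = true := (PySem.Chars.startswith_iff c p).mpr hpc
    simp only [bCore, hsw, if_true]
    have hfind : PySem.Chars.find c ['\n'] = -1 := by
      apply find_eq_neg_one_of
      intro i
      exact hno [] i
    rw [if_neg (by omega : ¬ (0:ℤ) < 0)]
    rw [PySem.Chars.findFrom_zero, hfind]
    rw [if_pos (by omega : (-1:ℤ) < 0)]
    rw [if_pos hpc]
    simp [PySem.Chars.slice_eq_listSlice, PySem.List.slice_to c (by omega : (0:ℤ) ≤ 0)]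
  · have hsw : PySem.Chars.startswith c p = false := by
      rw [← Bool.not_eq_true, PySem.Chars.startswith_iff]; exact hpc
    simp only [bCore, hsw, Bool.false_eq_true, if_false]
    have hfind : PySem.Chars.find c ('\n' :: p) = -1 := find_eq_neg_one_of _ _ (hno p)
    rw [hfind]
    rw [if_pos (by omega : (-1:ℤ) < 0), if_pos (by omega : (-1:ℤ) < 0)]
    rw [if_neg hpc]

theorem bCore_hit (p e l r : List Char) (hl : '\n' ∉ l)
    (hpl : p <+: l) : bCore p e (l ++ '\n' :: r) = e ++ '\n' :: r := by
  set c := l ++ '\n' :: r with hc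
  have hpc : p <+: c := hpl.trans (l.prefix_append _)
  have hsw : PySem.Chars.startswith c p = true := (PySem.Chars.startswith_iff c p).mpr hpc
  simp only [bCore, hsw, if_true]
  rw [if_neg (by omega : ¬ (0:ℤ) < 0)]
  have hfind : PySem.Chars.find c ['\n'] = (l.length : ℤ) := by
    apply find_eq_coe
    · rw [hc, List.drop_left]
      exact ⟨r, rfl⟩
    · intro i hi
      exact no_nl_prefix l r [] hl i hi
  rw [PySem.Chars.findFrom_zero, hfind]
  rw [if_neg (by omega : ¬ ((l.length : ℤ) < 0))]
  simp only [PySem.Chars.slice_eq_listSlice]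
  rw [PySem.List.slice_to c (by omega : (0:ℤ) ≤ 0)]
  rw [PySem.List.slice_from c (by omega : (0:ℤ) ≤ (l.length : ℤ))]
  simp only [Int.toNat_zero, List.take_zero, List.nil_append, Int.toNat_natCast]
  rw [hc, List.drop_left]

theorem bCore_step (p e l r : List Char) (hp : '\n' ∉ p) (hl : '\n' ∉ l)
    (hpl : ¬ p <+: l) : bCore p e (l ++ '\n' :: r) = l ++ '\n' :: bCore p e r := by
  set c := l ++ '\n' :: r with hc
  have hlen : c.length = l.length + 1 + r.length := by simp [hc]; omega
  have hpc : ¬ p <+: c := fun h => hpl ((prefix_first_line p l r hp).mp h)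
  have hsw : PySem.Chars.startswith c p = false := by
    rw [← Bool.not_eq_true, PySem.Chars.startswith_iff]; exact hpc
  have hdropk : c.drop l.length = '\n' :: r := by rw [hc, List.drop_left]
  have hdrop1 : ∀ x, c.drop (l.length + 1 + x) = r.drop x := fun x => drop_shift l r '\n' x
  have htake1 : ∀ x, c.take (l.length + 1 + x) = l ++ '\n' :: r.take x := fun x => take_shift l r '\n' x
  by_cases hpr : p <+: r
  · have hswr : PySem.Chars.startswith r p = true := (PySem.Chars.startswith_iff r p).mpr hpr
    have hj : PySem.Chars.find c ('\n' :: p) = (l.length : ℤ) := by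
      apply find_eq_coe
      · rw [hdropk]; exact List.cons_prefix_cons.mpr ⟨rfl, hpr⟩
      · intro i hi; exact no_nl_prefix l r p hl i hi
    simp only [bCore, hsw, Bool.false_eq_true, if_false, hj, hswr, if_true]
    rw [if_neg (by omega : ¬ ((l.length : ℤ) < 0))]
    rw [if_neg (by omega : ¬ ((l.length : ℤ) + 1 < 0))]
    rw [if_neg (by omega : ¬ ((0:ℤ) < 0))]
    have hcast : (l.length : ℤ) + 1 = ((l.length + 1 : ℕ) : ℤ) := by push_cast; ring
    rw [hcast, PySem.Chars.findFrom_natCast c ['\n'] (l.length + 1) (by omega)]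
    have hdrop : c.drop (l.length + 1) = r := by
      have := hdrop1 0; simpa using this
    rw [hdrop, PySem.Chars.findFrom_zero]
    by_cases h0 : PySem.Chars.find r ['\n'] = -1
    · rw [if_pos h0, h0]
      rw [if_pos (by omega : (-1:ℤ) < 0), if_pos (by omega : (-1:ℤ) < 0)]
      simp only [PySem.Chars.slice_eq_listSlice]
      rw [PySem.List.slice_to c (by omega : (0:ℤ) ≤ ((l.length + 1 : ℕ) : ℤ))]
      rw [PySem.List.slice_to r (by omega : (0:ℤ) ≤ 0)]
      simp only [Int.toNat_natCast, Int.toNat_zero, List.take_zero, List.nil_append]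
      rw [show c.take (l.length + 1) = l ++ ['\n'] by simpa using htake1 0]
      simp
    · have hge : 0 ≤ PySem.Chars.find r ['\n'] := by
        have := PySem.Chars.neg_one_le_find r ['\n']; omega
      set q := (PySem.Chars.find r ['\n']).toNat with hq
      have hqq : PySem.Chars.find r ['\n'] = (q : ℤ) := by omega
      rw [if_neg h0, hqq]
      rw [if_neg (by omega : ¬ (((l.length + 1 : ℕ) : ℤ) + (q : ℤ) < 0))]
      rw [if_neg (by omega : ¬ ((q : ℤ) < 0))]
      simp only [PySem.Chars.slice_eq_listSlice]
      rw [PySem.List.slice_to c (by omega : (0:ℤ) ≤ ((l.length + 1 : ℕ) : ℤ))]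
      rw [PySem.List.slice_to r (by omega : (0:ℤ) ≤ 0)]
      rw [PySem.List.slice_from c (by omega : (0:ℤ) ≤ ((l.length + 1 : ℕ) : ℤ) + (q : ℤ))]
      rw [PySem.List.slice_from r (by omega : (0:ℤ) ≤ (q : ℤ))]
      simp only [Int.toNat_natCast, Int.toNat_zero, List.take_zero, List.nil_append]
      rw [show (((l.length + 1 : ℕ) : ℤ) + (q : ℤ)).toNat = l.length + 1 + q by omega]
      rw [hdrop1 q]
      rw [show c.take (l.length + 1) = l ++ ['\n'] by simpa using htake1 0]
      simp
  · have hswr : PySem.Chars.startswith r p = false := by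
      rw [← Bool.not_eq_true, PySem.Chars.startswith_iff]; exact hpr
    have hocc : ∀ i, ('\n' :: p) <+: c.drop i → ∃ x, i = l.length + 1 + x := by
      intro i hi
      rcases lt_trichotomy i l.length with h | h | h
      · exact absurd hi (no_nl_prefix l r p hl i h)
      · subst h; rw [hdropk] at hi
        exact absurd (List.cons_prefix_cons.mp hi).2 hpr
      · exact ⟨i - l.length - 1, by omega⟩
    by_cases hjr : PySem.Chars.find r ('\n' :: p) = -1
    · have hj : PySem.Chars.find c ('\n' :: p) = -1 := by
        apply find_eq_neg_one_of
        intro i hi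
        obtain ⟨x, hx⟩ := hocc i hi
        rw [hx, hdrop1 x] at hi
        exact not_prefix_drop_of_find_neg r _ hjr x hi
      simp only [bCore, hsw, Bool.false_eq_true, if_false, hj, hswr, hjr]
      rw [if_pos (by omega : (-1:ℤ) < 0)]
      rw [if_pos (by omega : (-1:ℤ) < 0)]
      rw [if_pos (by omega : (-1:ℤ) < 0)]
      simp [hc]
    · have hger : 0 ≤ PySem.Chars.find r ('\n' :: p) := by
        have := PySem.Chars.neg_one_le_find r ('\n' :: p); omega
      obtain ⟨hpre_r, hmin_r⟩ := PySem.Chars.find_spec hger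
      set m := (PySem.Chars.find r ('\n' :: p)).toNat with hm
      have hmr : PySem.Chars.find r ('\n' :: p) = (m : ℤ) := by omega
      have hmlt : m < r.length := by
        rcases hpre_r with ⟨t, ht⟩
        have := congrArg List.length ht
        simp at this
        omega
      have hj : PySem.Chars.find c ('\n' :: p) = ((l.length + 1 + m : ℕ) : ℤ) := by
        apply find_eq_coe
        · rw [hdrop1 m]; exact hpre_r
        · intro i hi hpre
          obtain ⟨x, hx⟩ := hocc i hpre
          rw [hx, hdrop1 x] at hpre
          exact hmin_r x (by omega) hpre
      simp only [bCore, hsw, Bool.false_eq_true, if_false, hj, hswr, hmr]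
      rw [if_neg (by omega : ¬ (((l.length + 1 + m : ℕ) : ℤ) < 0))]
      rw [if_neg (by omega : ¬ (((l.length + 1 + m : ℕ) : ℤ) + 1 < 0))]
      rw [if_neg (by omega : ¬ ((m : ℤ) < 0))]
      rw [if_neg (by omega : ¬ ((m : ℤ) + 1 < 0))]
      have hc1 : ((l.length + 1 + m : ℕ) : ℤ) + 1 = ((l.length + 1 + (m + 1) : ℕ) : ℤ) := by push_cast; ring
      have hc2 : (m : ℤ) + 1 = ((m + 1 : ℕ) : ℤ) := by push_cast; ring
      rw [hc1, hc2]
      rw [PySem.Chars.findFrom_natCast c ['\n'] (l.length + 1 + (m + 1)) (by omega)]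
      rw [PySem.Chars.findFrom_natCast r ['\n'] (m + 1) (by omega)]
      rw [hdrop1 (m + 1)]
      by_cases h0 : PySem.Chars.find (r.drop (m + 1)) ['\n'] = -1
      · rw [if_pos h0, if_pos h0]
        rw [if_pos (by omega : (-1:ℤ) < 0), if_pos (by omega : (-1:ℤ) < 0)]
        simp only [PySem.Chars.slice_eq_listSlice]
        rw [PySem.List.slice_to c (by omega : (0:ℤ) ≤ ((l.length + 1 + (m + 1) : ℕ) : ℤ))]
        rw [PySem.List.slice_to r (by omega : (0:ℤ) ≤ ((m + 1 : ℕ) : ℤ))]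
        simp only [Int.toNat_natCast]
        rw [htake1 (m + 1)]
        simp
      · have hge0 : 0 ≤ PySem.Chars.find (r.drop (m + 1)) ['\n'] := by
          have := PySem.Chars.neg_one_le_find (r.drop (m + 1)) ['\n']; omega
        set w := (PySem.Chars.find (r.drop (m + 1)) ['\n']).toNat with hw
        have hww : PySem.Chars.find (r.drop (m + 1)) ['\n'] = (w : ℤ) := by omega
        rw [if_neg h0, if_neg h0, hww]
        rw [if_neg (by omega : ¬ (((l.length + 1 + (m + 1) : ℕ) : ℤ) + (w : ℤ) < 0))]
        rw [if_neg (by omega : ¬ (((m + 1 : ℕ) : ℤ) + (w : ℤ) < 0))]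
        simp only [PySem.Chars.slice_eq_listSlice]
        rw [PySem.List.slice_to c (by omega : (0:ℤ) ≤ ((l.length + 1 + (m + 1) : ℕ) : ℤ))]
        rw [PySem.List.slice_to r (by omega : (0:ℤ) ≤ ((m + 1 : ℕ) : ℤ))]
        rw [PySem.List.slice_from c (by omega : (0:ℤ) ≤ ((l.length + 1 + (m + 1) : ℕ) : ℤ) + (w : ℤ))]
        rw [PySem.List.slice_from r (by omega : (0:ℤ) ≤ ((m + 1 : ℕ) : ℤ) + (w : ℤ))]
        simp only [Int.toNat_natCast]
        rw [show (((l.length + 1 + (m + 1) : ℕ) : ℤ) + (w : ℤ)).toNat = l.length + 1 + (m + 1 + w) by omega]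
        rw [show (((m + 1 : ℕ) : ℤ) + (w : ℤ)).toNat = m + 1 + w by omega]
        rw [hdrop1 (m + 1 + w), htake1 (m + 1)]
        simp

theorem exists_first_nl (c : List Char) (h : '\n' ∈ c) :
    ∃ l r, c = l ++ '\n' :: r ∧ '\n' ∉ l := by
  induction c with
  | nil => simp at h
  | cons a s ih =>
    by_cases ha : a = '\n'
    · exact ⟨[], s, by simp [ha], by simp⟩
    · have hs : '\n' ∈ s := by
        rcases List.mem_cons.mp h with h1 | h1
        · exact absurd h1.symm ha
        · exact h1
      obtain ⟨l, r, rfl, hl⟩ := ih hs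
      exact ⟨a :: l, r, rfl, by simp [hl]; exact fun hh => ha hh.symm⟩

theorem bCore_eq (p e : List Char) (hp : '\n' ∉ p) (c : List Char) :
    bCore p e c = PySem.Chars.join ['\n'] (pvAGo p e (linesplit c)) := by
  induction hn : c.length using Nat.strong_induction_on generalizing c with
  | _ n ih =>
  by_cases hnl : '\n' ∈ c
  · obtain ⟨l, r, rfl, hl⟩ := exists_first_nl c hnl
    rw [linesplit_append l r hl]
    by_cases hpl : p <+: l
    · rw [bCore_hit p e l r hl hpl]
      have hsw : PySem.Chars.startswith l p = true := (PySem.Chars.startswith_iff l p).mpr hpl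
      rw [pvAGo, if_pos hsw]
      rw [join_cons e _ (linesplit_ne_nil r), join_linesplit]
    · rw [bCore_step p e l r hp hl hpl]
      have hsw : PySem.Chars.startswith l p = false := by
        rw [← Bool.not_eq_true, PySem.Chars.startswith_iff]; exact hpl
      rw [pvAGo, if_neg (by simp [hsw])]
      rw [join_cons l _ (pvAGo_ne_nil p e _)]
      rw [ih r.length (by simp at hn; omega) r rfl]
  · rw [linesplit_no_nl c hnl, bCore_nonl p e c hnl]
    by_cases hpl : p <+: c
    · have hsw : PySem.Chars.startswith c p = true := (PySem.Chars.startswith_iff c p).mpr hpl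
      rw [if_pos hpl, pvAGo, if_pos hsw, PySem.Chars.join_singleton]
    · have hsw : PySem.Chars.startswith c p = false := by
        rw [← Bool.not_eq_true, PySem.Chars.startswith_iff]; exact hpl
      rw [if_neg hpl, pvAGo, if_neg (by simp [hsw])]
      rw [join_cons c _ (pvAGo_ne_nil p e _), pvAGo, PySem.Chars.join_singleton]


theorem mem_linesplit_no_nl (c : List Char) (l : List Char) (h : l ∈ linesplit c) : '\n' ∉ l := by
  induction c generalizing l with
  | nil => simp [linesplit] at h; simp [h]
  | cons a s ih =>
    by_cases ha : a = '\n'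
    · rw [linesplit, if_pos ha] at h
      rcases List.mem_cons.mp h with h1 | h1
      · simp [h1]
      · exact ih l h1
    · rw [linesplit, if_neg ha] at h
      rcases hs : linesplit s with _ | ⟨t, ts⟩
      · exact absurd hs (linesplit_ne_nil s)
      · rw [hs] at h
        simp only [List.headI, List.tail] at h
        rcases List.mem_cons.mp h with h1 | h1
        · subst h1
          have ht : '\n' ∉ t := ih t (by rw [hs]; exact List.mem_cons_self)
          simp [ht]
          exact fun hh => ha hh.symm
        · exact ih l (by rw [hs]; exact List.mem_cons_of_mem _ h1)

theorem pvAGo_no_match (p e : List Char) (ls : List (List Char))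
    (h : ∀ l ∈ ls, ¬ p <+: l) : pvAGo p e ls = ls ++ [e] := by
  induction ls with
  | nil => rfl
  | cons l ls ih =>
    have hsw : PySem.Chars.startswith l p = false := by
      rw [← Bool.not_eq_true, PySem.Chars.startswith_iff]
      exact h l List.mem_cons_self
    rw [pvAGo, if_neg (by simp [hsw])]
    rw [ih (fun x hx => h x (List.mem_cons_of_mem _ hx))]
    rfl

theorem join_append_singleton (ls : List (List Char)) (e : List Char) (h : ls ≠ []) :
    PySem.Chars.join ['\n'] (ls ++ [e]) = PySem.Chars.join ['\n'] ls ++ '\n' :: e := by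
  induction ls with
  | nil => exact absurd rfl h
  | cons x ls ih =>
    cases ls with
    | nil => rw [List.cons_append, List.nil_append, join_cons x [e] (by simp), PySem.Chars.join_singleton, PySem.Chars.join_singleton]
    | cons y ys =>
      rw [List.cons_append, join_cons x _ (by simp), join_cons x (y :: ys) (by simp), ih (by simp)]
      simp

theorem pvWitness_ok : Dom_update_env_var_py (pvWitness_update_env_var_py.1) (pvWitness_update_env_var_py.2.1) (pvWitness_update_env_var_py.2.2) ∧ Pre_update_env_var_py (pvWitness_update_env_var_py.1) (pvWitness_update_env_var_py.2.1) (pvWitness_update_env_var_py.2.2) := by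
  constructor <;> decide

-- ===== VERDICT (by name: the statement is the Claim_ definition above) =====
theorem update_env_var_py_spec : Claim_equal_update_env_var_py := by
  intro content key value _hdom hpre
  unfold Spec_update_env_var_py
  by_cases hk : '\n' ∈ key.toList
  · -- key contains a newline; Pre_ guarantees no string-level match either, so both append
    rcases hpre with hpre | ⟨hnp, hni⟩
    · exact absurd hk hpre
    · have hp : '\n' ∈ key.toList ++ ['='] := List.mem_append.mpr (Or.inl hk)
      rw [alt_eq_bCore]
      have hsw : PySem.Chars.startswith content.toList (key.toList ++ ['=']) = false := by
        rw [← Bool.not_eq_true, PySem.Chars.startswith_iff]; exact hnp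
      have hfind : PySem.Chars.find content.toList ('\n' :: (key.toList ++ ['='])) = -1 := by
        rw [PySem.Chars.find_eq_neg_one_iff]; exact hni
      have hB : bCore (key.toList ++ ['=']) (key.toList ++ '=' :: value.toList) content.toList =
          content.toList ++ '\n' :: (key.toList ++ '=' :: value.toList) := by
        simp only [bCore, hsw, Bool.false_eq_true, if_false, hfind]
        rw [if_pos (by omega : (-1:ℤ) < 0), if_pos (by omega : (-1:ℤ) < 0)]
      rw [hB]
      unfold update_env_var_py
      dsimp only
      rw [splitOn_eq_linesplit]
      have hno : ∀ l ∈ linesplit content.toList, ¬ (key.toList ++ ['=']) <+: l := by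
        intro l hl hpl
        exact mem_linesplit_no_nl content.toList l hl (hpl.subset hp)
      rw [pvAGo_no_match _ _ _ hno]
      rw [join_append_singleton _ _ (linesplit_ne_nil _), join_linesplit]
  · have hp : '\n' ∉ key.toList ++ ['='] := by
      intro h
      rcases List.mem_append.mp h with h | h
      · exact hk h
      · simp at h
    rw [alt_eq_bCore, bCore_eq _ _ hp]
    unfold update_env_var_py
    rw [splitOn_eq_linesplit]
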